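-- pv_equiv track=rewrite | github.com/lanceshih/vtk-examples | src/Python/Visualization/CurvatureBandsWithGlyphs.py | adjust_frequency_ranges
-- ===== SOURCE A (Python) =====
-- def adjust_frequency_ranges(freq):
--     """
--     Get the indices of the first and last non-zero elements.
--     :param freq: The frequency dictionary.
--     :return: The indices of the first and last non-zero elements.
--     """
--     first = 0
--     for k, v in freq.items():
--         if v != 0:
--             first = k
--             break
--     rev_keys = list(freq.keys())[::-1]
--     last = rev_keys[0]
--     for idx in list(freq.keys())[::-1]:
--         if freq[idx] != 0:
--             last = idx
--             break
--     return first, last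
-- ===== SOURCE B (Python) =====
-- def adjust_frequency_ranges(freq):
--     """
--     Get the indices of the first and last non-zero elements.
--     Single forward pass instead of a forward scan plus a reverse scan.
--     """
--     keys = list(freq)
--     last = keys[-1]
--     first = 0
--     seen = False
--     for k, v in freq.items():
--         if v != 0:
--             last = k
--             if not seen:
--                 first = k
--                 seen = True
--     return first, last
-- ===== Notes on version B (the rewrite author's own statement) =====
-- stated objective: simpler
-- what changed: Replaces A's forward scan plus a second reversed-keys scan with dict lookups by one forward pass over the items that tracks both the first and the last non-zero key.
import Mathlib
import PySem

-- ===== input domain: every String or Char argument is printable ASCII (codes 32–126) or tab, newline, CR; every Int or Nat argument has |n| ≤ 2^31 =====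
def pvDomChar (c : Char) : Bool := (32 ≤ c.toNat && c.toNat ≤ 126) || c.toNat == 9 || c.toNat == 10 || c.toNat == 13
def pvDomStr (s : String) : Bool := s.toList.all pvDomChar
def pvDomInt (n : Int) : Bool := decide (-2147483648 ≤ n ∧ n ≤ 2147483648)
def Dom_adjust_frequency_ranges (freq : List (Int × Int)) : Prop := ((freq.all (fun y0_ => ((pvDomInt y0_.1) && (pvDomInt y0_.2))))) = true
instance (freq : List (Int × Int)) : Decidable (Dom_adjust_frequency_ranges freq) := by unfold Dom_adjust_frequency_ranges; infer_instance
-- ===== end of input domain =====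

-- B replaces A's two scans (forward, then reversed keys with dict lookups) by one forward
-- pass tracking first and last non-zero key: simpler, same O(n) cost.


-- ===== PORT A =====
-- first loop of A: first key with non-zero value, else the initial 0 (break = return)
def pvA_first : List (Int × Int) → Int
  | [] => 0
  | (k, v) :: rest => if v ≠ 0 then k else pvA_first rest

-- freq[idx]: dict lookup = first matching key (none = KeyError; idx always comes from freq's keys here)
def pvA_lookup : List (Int × Int) → Int → Option Int
  | [], _ => none
  | (k', v) :: rest, k => if k' = k then some v else pvA_lookup rest k

-- second loop of A over the reversed key list, with the freq[idx] lookup (break = return)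
def pvA_last (freq : List (Int × Int)) : List Int → Int → Int
  | [], last => last
  | idx :: rest, last =>
      if (pvA_lookup freq idx).getD 0 ≠ 0 then idx else pvA_last freq rest last

def adjust_frequency_ranges (freq : List (Int × Int)) : Int × Int :=
  let first := pvA_first freq
  let rev_keys := (PySem.List.slice? (freq.map Prod.fst) none none (-1)).getD []
  let last := (PySem.List.pyGet? rev_keys 0).getD 0   -- rev_keys[0]; none (IndexError on empty dict) excluded by Pre_
  (first, pvA_last freq rev_keys last)

-- ===== PORT B =====
-- the body of B's single loop: state (first, seen, last)
def pvB_step (st : Int × Bool × Int) (kv : Int × Int) : Int × Bool × Int :=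
  if kv.2 ≠ 0 then (if st.2.1 then st.1 else kv.1, true, kv.1) else st

def adjust_frequency_ranges_alt (freq : List (Int × Int)) : Int × Int :=
  let keys := freq.map Prod.fst
  let last0 := (PySem.List.pyGet? keys (-1)).getD 0   -- keys[-1]; none (IndexError on empty dict) excluded by Pre_
  let st := freq.foldl pvB_step (0, false, last0)
  (st.1, st.2.2)

-- ===== PRECONDITION & SPEC =====
-- Pre_ excludes the empty dict, on which A raises IndexError (rev_keys[0]); the Nodup
-- condition is only the Lean-side encoding of the dict invariant (a Python dict never
-- has duplicate keys), so it excludes no Python input.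
def Pre_adjust_frequency_ranges (freq : List (Int × Int)) : Prop :=
  freq ≠ [] ∧ (freq.map Prod.fst).Nodup
instance (freq : List (Int × Int)) : Decidable (Pre_adjust_frequency_ranges freq) := by unfold Pre_adjust_frequency_ranges; infer_instance
def pvWitness_adjust_frequency_ranges : (List (Int × Int)) := [(1, 0), (2, 3)]

def Spec_adjust_frequency_ranges (freq : List (Int × Int)) (out : Int × Int) : Prop := out = adjust_frequency_ranges_alt freq
instance (freq : List (Int × Int)) (out : Int × Int) : Decidable (Spec_adjust_frequency_ranges freq out) := by unfold Spec_adjust_frequency_ranges; infer_instance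

-- ===== CLAIM (what is proved, stated in full; the proofs are below) =====
def Claim_equal_adjust_frequency_ranges : Prop := ∀ (freq : List (Int × Int)), Dom_adjust_frequency_ranges freq → Pre_adjust_frequency_ranges freq → Spec_adjust_frequency_ranges freq (adjust_frequency_ranges freq)

-- ===== LEMMAS AND PROOFS =====

-- A's second loop, re-expressed over the pairs themselves (v taken from the pair, not a lookup)
def pvG : List (Int × Int) → Int → Int
  | [], d => d
  | (k, v) :: t, d => if v ≠ 0 then k else pvG t d

theorem pvG_append_singleton (xs : List (Int × Int)) (p : Int × Int) (d : Int) :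
    pvG (xs ++ [p]) d = pvG xs (if p.2 ≠ 0 then p.1 else d) := by
  induction xs with
  | nil => simp [pvG]
  | cons q t ih => cases q with | mk k v => simp [pvG, ih]

theorem pvA_lookup_nodup (freq : List (Int × Int)) (h : (freq.map Prod.fst).Nodup) :
    ∀ p ∈ freq, pvA_lookup freq p.1 = some p.2 := by
  induction freq with
  | nil => intro p hp; cases hp
  | cons q t ih =>
    cases q with | mk k v =>
    simp only [List.map_cons, List.nodup_cons] at h
    intro p hp
    rw [List.mem_cons] at hp
    rcases hp with hp | hp
    · subst hp; simp [pvA_lookup]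
    · have hne : k ≠ p.1 := by
        intro he; exact h.1 (he ▸ (List.mem_map.mpr ⟨p, hp, rfl⟩))
      simp only [pvA_lookup, if_neg hne]
      exact ih h.2 p hp

theorem pvA_last_eq_pvG (freq : List (Int × Int)) (l : List (Int × Int)) (d : Int)
    (H : ∀ p ∈ l, pvA_lookup freq p.1 = some p.2) :
    pvA_last freq (l.map Prod.fst) d = pvG l d := by
  induction l with
  | nil => rfl
  | cons q t ih =>
    cases q with | mk k v =>
    have hq := H (k, v) (by simp)
    simp only [List.map_cons, pvA_last, pvG, hq, Option.getD_some]
    split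
    · rfl
    · exact ih (fun p hp => H p (List.mem_cons_of_mem _ hp))

-- B's fold, last component
theorem fold_last (l : List (Int × Int)) (st : Int × Bool × Int) :
    (l.foldl pvB_step st).2.2 = pvG l.reverse st.2.2 := by
  induction l generalizing st with
  | nil => rfl
  | cons q t ih =>
    cases q with | mk k v =>
    have hstep : (pvB_step st (k, v)).2.2 = if v ≠ 0 then k else st.2.2 := by
      by_cases hv : v ≠ 0 <;> simp [pvB_step, hv]
    rw [List.foldl_cons, List.reverse_cons, pvG_append_singleton, ih, hstep]

-- B's fold, first component: once seen it is frozen …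
theorem fold_first_seen (l : List (Int × Int)) (x : Int) (d : Int) :
    (l.foldl pvB_step (x, true, d)).1 = x := by
  induction l generalizing d with
  | nil => rfl
  | cons q t ih =>
    cases q with | mk k v =>
    by_cases hv : v ≠ 0
    · have : pvB_step (x, true, d) (k, v) = (x, true, k) := by simp [pvB_step, hv]
      rw [List.foldl_cons, this]; exact ih k
    · have : pvB_step (x, true, d) (k, v) = (x, true, d) := by simp [pvB_step, hv]
      rw [List.foldl_cons, this]; exact ih d

-- … and until seen it computes A's first loop
theorem fold_first (l : List (Int × Int)) (d : Int) :
    (l.foldl pvB_step (0, false, d)).1 = pvA_first l := by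
  induction l generalizing d with
  | nil => rfl
  | cons q t ih =>
    cases q with | mk k v =>
    by_cases hv : v ≠ 0
    · have : pvB_step (0, false, d) (k, v) = (k, true, k) := by simp [pvB_step, hv]
      rw [List.foldl_cons, this, pvA_first, if_pos hv, fold_first_seen]
    · have : pvB_step (0, false, d) (k, v) = (0, false, d) := by simp [pvB_step, hv]
      rw [List.foldl_cons, this, pvA_first, if_neg hv, ih]

-- ===== VERDICT (by name: the statement is the Claim_ definition above) =====
theorem adjust_frequency_ranges_spec : Claim_equal_adjust_frequency_ranges := by
  intro freq _ hpre
  obtain ⟨hne, hnd⟩ := hpre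
  unfold Spec_adjust_frequency_ranges adjust_frequency_ranges adjust_frequency_ranges_alt
  simp only [PySem.List.slice?_none_none_neg_one, Option.getD_some,
    PySem.List.pyGet?_neg_one, PySem.List.pyGet?_zero, fold_last, fold_first]
  have hrev : (freq.map Prod.fst).reverse = freq.reverse.map Prod.fst := by
    simp [List.map_reverse]
  rw [hrev, pvA_last_eq_pvG freq freq.reverse _
      (fun p hp => pvA_lookup_nodup freq hnd p (List.mem_reverse.mp hp))]
  have hhead : (freq.reverse.map Prod.fst)[0]? = (freq.map Prod.fst).getLast? := by
    rw [← hrev, ← List.head?_eq_getElem?, List.head?_reverse]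
  rw [hhead]
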